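-- pv_equiv track=rewrite | github.com/Zeyy404/alx-interview | 0x0A-primegame/0-prime_game.py | precompute_winner
-- ===== SOURCE A (Python) =====
-- def sieve_of_eratosthenes(max_num):
--     """
--     Function to find all primes up to
--     a maximum number using Sieve of Eratosthenes
--     """
--     is_prime = [True] * (max_num + 1)
--     p = 2
--     while (p * p <= max_num):
--         if is_prime[p]:
--             for i in range(p * p, max_num + 1, p):
--                 is_prime[i] = False
--         p += 1
--     return [p for p in range(2, max_num + 1) if is_prime[p]]
--
-- def precompute_winner(max_n):
--     """
--     Precompute the number of moves for each n
--     and store the winner for each game.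
--     """
--     if max_n < 2:
--         return ["Ben"] * (max_n + 1)
--
--     primes = sieve_of_eratosthenes(max_n)
--     winners = [None] * (max_n + 1)
--     moves = [0] * (max_n + 1)
--
--     for prime in primes:
--         for multiple in range(prime, max_n + 1, prime):
--             moves[multiple] += 1
--
--     for n in range(1, max_n + 1):
--         if moves[n] % 2 == 0:
--             winners[n] = "Ben"
--         else:
--             winners[n] = "Maria"
--
--     return winners
-- ===== SOURCE B (Python) =====
-- def precompute_winner(max_n):
--     """
--     Smallest-prime-factor index table, then per-number factorization:
--     no primes list and no per-prime add-1 marking of a moves array.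
--     """
--     if max_n < 2:
--         return ["Ben"] * (max_n + 1)
--
--     spf = list(range(max_n + 1))
--     i = 2
--     while i * i <= max_n:
--         if spf[i] == i:
--             for j in range(i * i, max_n + 1, i):
--                 if spf[j] == j:
--                     spf[j] = i
--         i += 1
--
--     winners = [None]
--     for n in range(1, max_n + 1):
--         count = 0
--         m = n
--         while m > 1:
--             p = spf[m]
--             count += 1
--             while m % p == 0:
--                 m //= p
--         winners.append("Ben" if count % 2 == 0 else "Maria")
--     return winners
-- ===== Notes on version B (the rewrite author's own statement) =====
-- stated objective: alternative
-- what changed: B replaces A's pipeline (boolean Eratosthenes sieve producing a primes list, then a pass adding 1 to every multiple of each prime in a shared moves array, then a winners-filling pass) by a smallest-prime-factor index table built once and a per-number factorization loop that divides out spf chains to count each n's distinct prime factors directly; no primes list and no multiple-counting pass.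
import Mathlib
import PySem

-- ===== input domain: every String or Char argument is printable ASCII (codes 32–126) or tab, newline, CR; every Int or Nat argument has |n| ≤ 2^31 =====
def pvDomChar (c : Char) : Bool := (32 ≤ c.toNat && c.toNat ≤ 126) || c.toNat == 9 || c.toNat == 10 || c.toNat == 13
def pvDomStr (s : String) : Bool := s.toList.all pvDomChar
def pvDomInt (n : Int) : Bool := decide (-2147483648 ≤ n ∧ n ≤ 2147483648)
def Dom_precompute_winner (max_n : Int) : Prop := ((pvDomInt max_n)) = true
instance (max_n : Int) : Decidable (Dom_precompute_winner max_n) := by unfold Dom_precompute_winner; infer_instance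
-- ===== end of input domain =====

-- B replaces A's sieve + multiple-marking passes by independent per-number
-- trial-division factorization; objective: alternative (no speed claim).

-- ===== PORT A =====
-- range(i, max+1, s+1) over Nat (Python range with positive step; step passed as s+1 for termination)
def pyRangeStep (N s i : Nat) : List Nat :=
  if i ≤ N then i :: pyRangeStep N s (i + s + 1) else []
termination_by N + 1 - i

-- while p*p <= max_num: if is_prime[p]: mark multiples False (indices are in range, so getD/set are exact)
def sieveLoop (N : Nat) (isp : List Bool) (p : Nat) : List Bool :=
  if h : p * p ≤ N then
    sieveLoop N
      (if isp.getD p false then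
        (pyRangeStep N (p - 1) (p * p)).foldl (fun a i => a.set i false) isp
      else isp) (p + 1)
  else isp
termination_by N + 1 - p
decreasing_by
  have hp : p ≤ p * p := by nlinarith
  omega

def sieve_of_eratosthenes (max_num : Nat) : List Nat :=
  let is_prime := sieveLoop max_num (List.replicate (max_num + 1) true) 2
  -- [p for p in range(2, max_num + 1) if is_prime[p]]
  (List.range' 2 (max_num - 1)).filter (fun p => is_prime.getD p false)

def precompute_winner (max_n : Int) : List (Option String) :=
  if max_n < 2 then List.replicate (max_n + 1).toNat (some "Ben")
  else
    let N := max_n.toNat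
    let primes := sieve_of_eratosthenes N
    let winners : List (Option String) := List.replicate (N + 1) none
    let moves : List Int := List.replicate (N + 1) 0
    let moves := primes.foldl
      (fun mv prime => (pyRangeStep N (prime - 1) prime).foldl
        (fun mv i => mv.set i (mv.getD i 0 + 1)) mv) moves
    let winners := (List.range' 1 N).foldl
      (fun w n => w.set n (if moves.getD n 0 % 2 = 0 then some "Ben" else some "Maria")) winners
    winners

-- ===== PORT B =====
-- inner `while m % p == 0: m //= p`; the `2 ≤ d ∧ 1 ≤ n` guard only makes the
-- recursion total (it holds on every state Python's loop reaches)
def stripFac (d n : Nat) : Nat :=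
  if h : n % d = 0 ∧ 2 ≤ d ∧ 1 ≤ n then stripFac d (n / d) else n
termination_by n
decreasing_by exact Nat.div_lt_self (by omega) (by omega)

theorem stripFac_le (d n : Nat) : stripFac d n ≤ n := by
  rw [stripFac]
  split_ifs with h
  · have h1 := stripFac_le d (n / d)
    have h2 : n / d ≤ n := Nat.div_le_self n d
    omega
  · exact le_refl n
termination_by n
decreasing_by exact Nat.div_lt_self (by omega) (by omega)

theorem stripFac_lt (d n : Nat) (hd : 2 ≤ d) (hn : 1 ≤ n) (hdvd : n % d = 0) :
    stripFac d n < n := by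
  rw [stripFac, dif_pos ⟨hdvd, hd, hn⟩]
  have h1 := stripFac_le d (n / d)
  have h2 : n / d < n := Nat.div_lt_self (by omega) (by omega)
  omega

-- smallest-prime-factor sieve: while i*i <= max_n: if spf[i]==i:
--   for j in range(i*i, max_n+1, i): if spf[j]==j: spf[j]=i
def spfLoop (N : Nat) (spf : List Nat) (i : Nat) : List Nat :=
  if h : i * i ≤ N then
    spfLoop N
      (if spf.getD i 0 = i then
        (pyRangeStep N (i - 1) (i * i)).foldl
          (fun a j => if a.getD j 0 = j then a.set j i else a) spf
      else spf) (i + 1)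
  else spf
termination_by N + 1 - i
decreasing_by
  have hp : i ≤ i * i := by nlinarith
  omega

-- per-number factorization: while m > 1: p = spf[m]; count += 1; while m % p == 0: m //= p
-- the `2 ≤ p ∧ p ∣ m` guard only makes the recursion total (spf m is a prime divisor
-- of m on every state Python's loop reaches, so the guard always holds there)
def factLoop (spf : List Nat) (m count : Nat) : Nat :=
  if 1 < m then
    if h : 2 ≤ spf.getD m 0 ∧ m % spf.getD m 0 = 0 then
      factLoop spf (stripFac (spf.getD m 0) m) (count + 1)
    else count + 1
  else count
termination_by m
decreasing_by exact stripFac_lt _ m h.1 (by omega) h.2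

def precompute_winner_alt (max_n : Int) : List (Option String) :=
  if max_n < 2 then List.replicate (max_n + 1).toNat (some "Ben")
  else
    let N := max_n.toNat
    let spf := spfLoop N (List.range (N + 1)) 2
    none :: (List.range' 1 N).map (fun n =>
      if factLoop spf n 0 % 2 = 0 then some "Ben" else some "Maria")

-- ===== PRECONDITION & SPEC =====
def Spec_precompute_winner (max_n : Int) (out : List (Option String)) : Prop := out = precompute_winner_alt max_n
instance (max_n : Int) (out : List (Option String)) : Decidable (Spec_precompute_winner max_n out) := by unfold Spec_precompute_winner; infer_instance

-- ===== CLAIM (what is proved, stated in full; the proofs are below) =====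
def Claim_equal_precompute_winner : Prop := ∀ (max_n : Int), Dom_precompute_winner max_n → Spec_precompute_winner max_n (precompute_winner max_n)

-- ===== LEMMAS AND PROOFS =====

-- folding `set`-shaped steps preserves the length
theorem length_foldl_set_step {α β : Type} (l : List β) (a : List α)
    (f : List α → β → List α) (h : ∀ a b, (f a b).length = a.length) :
    (l.foldl f a).length = a.length := by
  induction l generalizing a with
  | nil => rfl
  | cons x l ih => simp [List.foldl_cons, ih, h]

theorem getD_set_nat {α : Type} (l : List α) (i m : Nat) (v d : α) (hm : m < l.length) :
    (l.set i v).getD m d = if i = m then v else l.getD m d := by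
  simp only [List.getD_eq_getElem?_getD, List.getElem?_set]
  split_ifs with h1 h2 <;> simp_all

-- shifting the start of an arithmetic progression by one step
theorem prog_shift (N s i m : Nat) (hne : i ≠ m) :
    (i + s + 1 ≤ m ∧ m ≤ N ∧ (s + 1) ∣ (m - (i + s + 1))) ↔ (i ≤ m ∧ m ≤ N ∧ (s + 1) ∣ (m - i)) := by
  constructor
  · rintro ⟨h1, h2, hd⟩
    refine ⟨by omega, h2, ?_⟩
    have hadd := Nat.dvd_add hd (dvd_refl (s + 1))
    have heq : m - (i + s + 1) + (s + 1) = m - i := by omega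
    rwa [heq] at hadd
  · rintro ⟨h1, h2, hd⟩
    have hpos : 0 < m - i := by omega
    have hle : s + 1 ≤ m - i := Nat.le_of_dvd hpos hd
    refine ⟨by omega, h2, ?_⟩
    have hsub := Nat.dvd_sub hd (dvd_refl (s + 1))
    have heq : m - i - (s + 1) = m - (i + s + 1) := by omega
    rwa [heq] at hsub

-- marking pass: the slot m gains 1 exactly when m lies on the arithmetic progression
theorem mark_getD (N s : Nat) (i : Nat) (mv : List Int) (m : Nat)
    (hm : m < mv.length) :
    ((pyRangeStep N s i).foldl (fun mv i => mv.set i (mv.getD i 0 + 1)) mv).getD m 0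
      = mv.getD m 0 + (if i ≤ m ∧ m ≤ N ∧ (s + 1) ∣ (m - i) then 1 else 0) := by
  by_cases h : i ≤ N
  · rw [pyRangeStep, if_pos h]
    simp only [List.foldl_cons]
    rw [mark_getD N s (i + s + 1) _ m (by simpa using hm)]
    rw [getD_set_nat _ _ _ _ _ hm]
    by_cases him : i = m
    · subst him
      have h2 : ¬ (i + s + 1 ≤ i ∧ i ≤ N ∧ (s + 1) ∣ (i - (i + s + 1))) := by omega
      have h3 : i ≤ i ∧ i ≤ N ∧ (s + 1) ∣ (i - i) := ⟨le_refl _, h, by simp⟩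
      rw [if_pos rfl, if_neg h2, if_pos h3]; ring
    · rw [if_neg him]
      rw [if_congr (prog_shift N s i m him) rfl rfl]
  · rw [pyRangeStep, if_neg h]
    simp only [List.foldl_nil]
    have hno : ¬ (i ≤ m ∧ m ≤ N ∧ (s + 1) ∣ (m - i)) := by
      rintro ⟨h1, h2, -⟩; omega
    rw [if_neg hno]; ring
termination_by N + 1 - i
decreasing_by omega

-- Bool variant for the sieve: the slot m is cleared exactly on the progression
theorem markF_getD (N s : Nat) (i : Nat) (isp : List Bool) (m : Nat)
    (hm : m < isp.length) :
    ((pyRangeStep N s i).foldl (fun a j => a.set j false) isp).getD m false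
      = if i ≤ m ∧ m ≤ N ∧ (s + 1) ∣ (m - i) then false else isp.getD m false := by
  by_cases h : i ≤ N
  · rw [pyRangeStep, if_pos h]
    simp only [List.foldl_cons]
    rw [markF_getD N s (i + s + 1) _ m (by simpa using hm)]
    rw [getD_set_nat _ _ _ _ _ hm]
    by_cases him : i = m
    · subst him
      have h3 : i ≤ i ∧ i ≤ N ∧ (s + 1) ∣ (i - i) := ⟨le_refl _, h, by simp⟩
      rw [if_pos rfl, if_pos h3]
      split_ifs <;> rfl
    · rw [if_neg him]
      rw [if_congr (prog_shift N s i m him) rfl rfl]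
  · rw [pyRangeStep, if_neg h]
    simp only [List.foldl_nil]
    have hno : ¬ (i ≤ m ∧ m ≤ N ∧ (s + 1) ∣ (m - i)) := by
      rintro ⟨h1, h2, -⟩; omega
    rw [if_neg hno]
termination_by N + 1 - i
decreasing_by omega

-- one prime's pass, phrased with the divisibility test
theorem mark_prime_getD (N p : Nat) (mv : List Int) (m : Nat)
    (hp : 1 ≤ p) (hm1 : 1 ≤ m) (hmN : m ≤ N) (hm : m < mv.length) :
    ((pyRangeStep N (p - 1) p).foldl (fun mv i => mv.set i (mv.getD i 0 + 1)) mv).getD m 0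
      = mv.getD m 0 + (if m % p = 0 then 1 else 0) := by
  rw [mark_getD N (p - 1) p mv m hm]
  have hs : p - 1 + 1 = p := by omega
  rw [hs]
  have hiff : (p ≤ m ∧ m ≤ N ∧ p ∣ (m - p)) ↔ (m % p = 0) := by
    constructor
    · rintro ⟨h1, _, hd⟩
      have hadd := Nat.dvd_add hd (dvd_refl p)
      have heq : m - p + p = m := by omega
      rw [heq] at hadd
      exact Nat.mod_eq_zero_of_dvd hadd
    · intro hmod
      have hd : p ∣ m := Nat.dvd_of_mod_eq_zero hmod
      have hpm : p ≤ m := Nat.le_of_dvd (by omega) hd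
      exact ⟨hpm, hmN, Nat.dvd_sub hd (dvd_refl p)⟩
  rw [if_congr hiff rfl rfl]

-- the whole moves accumulation equals a per-number count over the prime list
theorem moves_getD (N : Nat) (m : Nat) (hm1 : 1 ≤ m) (hmN : m ≤ N) :
    ∀ (ps : List Nat) (mv : List Int), mv.length = N + 1 → (∀ p ∈ ps, 1 ≤ p) →
    (ps.foldl (fun mv prime => (pyRangeStep N (prime - 1) prime).foldl
        (fun mv i => mv.set i (mv.getD i 0 + 1)) mv) mv).getD m 0
      = mv.getD m 0 + (ps.countP (fun p => decide (m % p = 0)) : Int) := by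
  intro ps
  induction ps with
  | nil => intro mv hlen _; simp
  | cons q ps ih =>
    intro mv hlen hpos
    simp only [List.foldl_cons]
    have hlen' : ((pyRangeStep N (q - 1) q).foldl
        (fun mv i => mv.set i (mv.getD i 0 + 1)) mv).length = N + 1 := by
      rw [length_foldl_set_step _ _ _ (fun a b => by simp)]; exact hlen
    rw [ih _ hlen' (fun p hp => hpos p (List.mem_cons_of_mem q hp))]
    rw [mark_prime_getD N q mv m (hpos q (by simp)) hm1 hmN (by omega)]
    rw [List.countP_cons]
    simp only [decide_eq_true_eq]
    push_cast
    split_ifs <;> ring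

-- writing pass of A: each slot n ∈ l is overwritten with g n (value depends only on the index)
theorem setfold_getElem? {α : Type} (g : Nat → α) :
    ∀ (l : List Nat) (w : List α) (j : Nat),
    (l.foldl (fun w n => w.set n (g n)) w)[j]? = if j ∈ l ∧ j < w.length then some (g j) else w[j]? := by
  intro l
  induction l with
  | nil => intro w j; simp
  | cons n l ih =>
    intro w j
    simp only [List.foldl_cons]
    rw [ih]
    simp only [List.length_set, List.getElem?_set, List.mem_cons]
    by_cases hjl : j ∈ l
    · by_cases hlen : j < w.length
      · simp [hjl, hlen]
      · have hw : w[j]? = none := List.getElem?_eq_none (by omega)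
        simp only [hjl, hlen, or_true, and_false, if_false, hw]
        split_ifs <;> first | omega | rfl
    · by_cases hnj : n = j
      · by_cases hlen : j < w.length
        · simp [hjl, hnj, hlen]
        · have hw : w[j]? = none := List.getElem?_eq_none (by omega)
          simp [hjl, hnj, hlen]
      · have hjn : ¬ j = n := fun h => hnj h.symm
        simp [hjl, hnj, hjn]

-- every sieve output is a positive number
theorem sieve_mem_pos (N : Nat) : ∀ p ∈ sieve_of_eratosthenes N, 1 ≤ p := by
  intro p hp
  unfold sieve_of_eratosthenes at hp
  simp only [List.mem_filter] at hp
  have := List.mem_range'_1.mp hp.1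
  omega

-- having no prime divisor below itself characterises primality (for 2 ≤ i)
theorem prime_iff_no_small (i : Nat) (hi : 2 ≤ i) :
    i.Prime ↔ ¬∃ q, q.Prime ∧ q < i ∧ q ∣ i := by
  constructor
  · rintro hp ⟨q, hq, hlt, hd⟩
    rcases hp.eq_one_or_self_of_dvd q hd with h | h
    · have := hq.one_lt; omega
    · omega
  · intro hno
    by_contra hnp
    have hq := Nat.minFac_prime (show i ≠ 1 by omega)
    have hd := Nat.minFac_dvd i
    have hne : i.minFac ≠ i := fun he => hnp (Nat.prime_def_minFac.mpr ⟨hi, he⟩)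
    have hle : i.minFac ≤ i := Nat.le_of_dvd (by omega) hd
    exact hno ⟨i.minFac, hq, by omega, hd⟩

-- a composite has a prime divisor whose square does not exceed it
theorem composite_small_factor (i : Nat) (hi : 2 ≤ i) (hnp : ¬ i.Prime) :
    ∃ q, q.Prime ∧ q < i ∧ q ∣ i ∧ q * q ≤ i := by
  have hq := Nat.minFac_prime (show i ≠ 1 by omega)
  have hd := Nat.minFac_dvd i
  have hsq : i.minFac ^ 2 ≤ i := Nat.minFac_sq_le_self (by omega) hnp
  have hne : i.minFac ≠ i := fun he => hnp (Nat.prime_def_minFac.mpr ⟨hi, he⟩)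
  have hle : i.minFac ≤ i := Nat.le_of_dvd (by omega) hd
  exact ⟨i.minFac, hq, by omega, hd, by nlinarith⟩

-- sieve invariant: a slot is cleared exactly when a suitable prime has marked it
theorem sieveLoop_false (N p : Nat) (isp : List Bool) (hp : 2 ≤ p) (hlen : isp.length = N + 1)
    (hinv : ∀ m, m ≤ N → (isp.getD m false = false ↔ ∃ q, q.Prime ∧ q < p ∧ q ∣ m ∧ q * q ≤ m)) :
    ∀ m, m ≤ N → ((sieveLoop N isp p).getD m false = false ↔ ∃ q, q.Prime ∧ q ∣ m ∧ q * q ≤ m) := by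
  by_cases h : p * p ≤ N
  · rw [sieveLoop]
    simp only [dif_pos h]
    have hpp : p ≤ p * p := by nlinarith
    have hpN : p ≤ N := by omega
    have hptest : isp.getD p false = true ↔ p.Prime := by
      constructor
      · intro ht
        by_contra hnp
        obtain ⟨q, hq, hlt, hd, hsq⟩ := composite_small_factor p hp hnp
        have : isp.getD p false = false := (hinv p hpN).mpr ⟨q, hq, hlt, hd, hsq⟩
        simp_all
      · intro hpr
        cases hb : isp.getD p false with
        | true => rfl
        | false =>
          obtain ⟨q, hq, hlt, hd, _⟩ := (hinv p hpN).mp hb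
          exact absurd hd ((prime_iff_no_small p hp).mp hpr |> fun hno hd => hno ⟨q, hq, hlt, hd⟩)
    by_cases hb : isp.getD p false = true
    · rw [if_pos hb]
      have hpr : p.Prime := hptest.mp hb
      apply sieveLoop_false N (p + 1) _ (by omega)
        (by rw [length_foldl_set_step _ _ _ (fun a b => by simp)]; exact hlen)
      intro m' hm'
      rw [markF_getD N (p - 1) (p * p) isp m' (by omega)]
      have hs : p - 1 + 1 = p := by omega
      rw [hs]
      by_cases hc : p * p ≤ m' ∧ m' ≤ N ∧ p ∣ (m' - p * p)
      · rw [if_pos hc]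
        have hdm : p ∣ m' := by
          have hadd := Nat.dvd_add hc.2.2 (Dvd.intro p rfl)
          have heq : m' - p * p + p * p = m' := by omega
          rwa [heq] at hadd
        constructor
        · intro _; exact ⟨p, hpr, by omega, hdm, hc.1⟩
        · intro _; rfl
      · rw [if_neg hc]
        rw [hinv m' hm']
        constructor
        · rintro ⟨q, hq, hlt, hd, hsq⟩
          exact ⟨q, hq, by omega, hd, hsq⟩
        · rintro ⟨q, hq, hlt, hd, hsq⟩
          by_cases hqp : q = p
          · subst hqp
            exfalso
            exact hc ⟨hsq, hm', Nat.dvd_sub hd (Dvd.intro q rfl)⟩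
          · exact ⟨q, hq, by omega, hd, hsq⟩
    · rw [if_neg hb]
      have hnp : ¬ p.Prime := fun hpr => hb (hptest.mpr hpr)
      apply sieveLoop_false N (p + 1) isp (by omega) hlen
      intro m' hm'
      rw [hinv m' hm']
      constructor
      · rintro ⟨q, hq, hlt, hd, hsq⟩
        exact ⟨q, hq, by omega, hd, hsq⟩
      · rintro ⟨q, hq, hlt, hd, hsq⟩
        by_cases hqp : q = p
        · subst hqp; exact absurd hq hnp
        · exact ⟨q, hq, by omega, hd, hsq⟩
  · intro m hm
    rw [sieveLoop]
    simp only [dif_neg h]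
    rw [hinv m hm]
    constructor
    · rintro ⟨q, hq, hlt, hd, hsq⟩
      exact ⟨q, hq, hd, hsq⟩
    · rintro ⟨q, hq, hd, hsq⟩
      have hqlt : q < p := by nlinarith
      exact ⟨q, hq, hqlt, hd, hsq⟩
termination_by N + 1 - p
decreasing_by all_goals omega

-- the sieve produces exactly the primes in [2, N]
theorem sieve_primes (N : Nat) (hN : 2 ≤ N) :
    sieve_of_eratosthenes N = (List.range' 2 (N - 1)).filter (fun p => decide p.Prime) := by
  unfold sieve_of_eratosthenes
  apply List.filter_congr
  intro x hx
  have hx' := List.mem_range'_1.mp hx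
  have hx2 : 2 ≤ x := hx'.1
  have hxN : x ≤ N := by omega
  have hfin := sieveLoop_false N 2 (List.replicate (N + 1) true) (le_refl 2) (by simp)
    (by
      intro m hm
      constructor
      · intro hfalse
        rw [List.getD_eq_getElem?_getD, List.getElem?_replicate] at hfalse
        simp only [if_pos (show m < N + 1 by omega)] at hfalse
        simp at hfalse
      · rintro ⟨q, hq, hlt, -⟩
        have := hq.two_le; omega) x hxN
  cases hb : (sieveLoop N (List.replicate (N + 1) true) 2).getD x false with
  | false =>
    obtain ⟨q, hq, hd, hsq⟩ := hfin.mp hb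
    have hnx : ¬ x.Prime := by
      intro hpx
      rcases hpx.eq_one_or_self_of_dvd q hd with h | h
      · have := hq.one_lt; omega
      · subst h; nlinarith
    simp [hnx]
  | true =>
    have hx : x.Prime := by
      by_contra hnp
      obtain ⟨q, hq, hlt, hd, hsq⟩ := composite_small_factor x hx2 hnp
      have := hfin.mpr ⟨q, hq, hd, hsq⟩
      simp_all
    simp [hx]

-- the countP over primes in [2, N] dividing n is n's distinct-prime-factor count
theorem countP_primeFactors (N n : Nat) (h1 : 1 ≤ n) (h2 : n ≤ N) :
    (List.range' 2 (N - 1)).countP (fun p => decide (n % p = 0) && decide p.Prime)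
      = n.primeFactors.card := by
  rw [List.countP_eq_length_filter]
  have hnd : (List.range' 2 (N - 1)).Nodup := List.nodup_range'
  have hfnd := hnd.filter (fun p => decide (n % p = 0) && decide p.Prime)
  rw [← List.toFinset_card_of_nodup hfnd]
  congr 1
  ext q
  simp only [List.mem_toFinset, List.mem_filter, List.mem_range'_1, Bool.and_eq_true,
    decide_eq_true_eq, Nat.mem_primeFactors]
  constructor
  · rintro ⟨-, hmod, hq⟩
    exact ⟨hq, Nat.dvd_of_mod_eq_zero hmod, by omega⟩
  · rintro ⟨hq, hd, -⟩
    have hq2 := hq.two_le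
    have hle : q ≤ n := Nat.le_of_dvd (by omega) hd
    exact ⟨⟨hq2, by omega⟩, Nat.mod_eq_zero_of_dvd hd, hq⟩

-- stripping: n = d ^ k * stripFac d n with d no longer dividing the remainder
theorem stripFac_spec (d n : Nat) (hd : 2 ≤ d) (hn : 1 ≤ n) :
    ∃ k, n = d ^ k * stripFac d n ∧ ¬ d ∣ stripFac d n := by
  rw [stripFac]
  by_cases h : n % d = 0
  · rw [dif_pos ⟨h, hd, hn⟩]
    have hdvd : d ∣ n := Nat.dvd_of_mod_eq_zero h
    have hq1 : 1 ≤ n / d := Nat.one_le_div_iff (by omega) |>.mpr (Nat.le_of_dvd (by omega) hdvd)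
    obtain ⟨k, hk, hnd⟩ := stripFac_spec d (n / d) hd hq1
    refine ⟨k + 1, ?_, hnd⟩
    have hmul : n = d * (n / d) := (Nat.mul_div_cancel' hdvd).symm
    rw [pow_succ]
    calc n = d * (n / d) := hmul
    _ = d * (d ^ k * stripFac d (n / d)) := by rw [← hk]
    _ = d ^ k * d * stripFac d (n / d) := by ring
  · rw [dif_neg (by tauto)]
    exact ⟨0, by simp, fun hdvd => h (Nat.mod_eq_zero_of_dvd hdvd)⟩
termination_by n
decreasing_by exact Nat.div_lt_self (by omega) (by omega)

-- conditional-marking pass of the spf sieve: slot m becomes v exactly when m lies on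
-- the progression and still held its own index; other slots' writes do not affect it
theorem markSpf_getD (N s v : Nat) (i : Nat) (spf : List Nat) (m : Nat)
    (hm : m < spf.length) :
    ((pyRangeStep N s i).foldl (fun a j => if a.getD j 0 = j then a.set j v else a) spf).getD m 0
      = if (i ≤ m ∧ m ≤ N ∧ (s + 1) ∣ (m - i)) ∧ spf.getD m 0 = m then v else spf.getD m 0 := by
  by_cases h : i ≤ N
  · rw [pyRangeStep, if_pos h]
    simp only [List.foldl_cons]
    have hlen' : (if spf.getD i 0 = i then spf.set i v else spf).length = spf.length := by
      split_ifs <;> simp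
    rw [markSpf_getD N s v (i + s + 1) _ m (by omega)]
    by_cases him : i = m
    · subst him
      have h2 : ¬ (i + s + 1 ≤ i ∧ i ≤ N ∧ (s + 1) ∣ (i - (i + s + 1))) := by omega
      have h3 : i ≤ i ∧ i ≤ N ∧ (s + 1) ∣ (i - i) := ⟨le_refl _, h, by simp⟩
      rw [if_neg (by tauto)]
      by_cases hb : spf.getD i 0 = i
      · rw [if_pos hb, getD_set_nat _ _ _ _ _ (by omega), if_pos rfl, if_pos ⟨h3, hb⟩]
      · rw [if_neg hb, if_neg (by tauto)]
    · have hsame : (if spf.getD i 0 = i then spf.set i v else spf).getD m 0 = spf.getD m 0 := by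
        split_ifs with hb
        · rw [getD_set_nat _ _ _ _ _ (by omega), if_neg him]
        · rfl
      rw [hsame]
      rw [if_congr (and_congr (prog_shift N s i m him) Iff.rfl) rfl rfl]
  · rw [pyRangeStep, if_neg h]
    simp only [List.foldl_nil]
    have hno : ¬ ((i ≤ m ∧ m ≤ N ∧ (s + 1) ∣ (m - i)) ∧ spf.getD m 0 = m) := by
      rintro ⟨⟨h1, h2, -⟩, -⟩; omega
    rw [if_neg hno]
termination_by N + 1 - i
decreasing_by omega

-- spf-sieve invariant: already-processed slots hold their smallest prime factor
theorem spfLoop_getD (N i : Nat) (spf : List Nat) (hi : 2 ≤ i) (hlen : spf.length = N + 1)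
    (hinv : ∀ m, 2 ≤ m → m ≤ N →
      spf.getD m 0 = if m.minFac < i ∧ m.minFac * m.minFac ≤ m then m.minFac else m) :
    ∀ m, 2 ≤ m → m ≤ N → (spfLoop N spf i).getD m 0
      = if m.minFac * m.minFac ≤ m then m.minFac else m := by
  by_cases h : i * i ≤ N
  · rw [spfLoop]
    simp only [dif_pos h]
    have hii : i ≤ i * i := by nlinarith
    have hiN : i ≤ N := by omega
    have htest : spf.getD i 0 = i ↔ i.Prime := by
      rw [hinv i hi hiN]
      constructor
      · intro ht
        by_contra hnp
        obtain ⟨q, hq, hlt, hqd, hsq⟩ := composite_small_factor i hi hnp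
        have hf1 : i.minFac ≤ q := Nat.minFac_le_of_dvd hq.two_le hqd
        have hcond : i.minFac < i ∧ i.minFac * i.minFac ≤ i := ⟨by omega, by nlinarith⟩
        rw [if_pos hcond] at ht
        omega
      · intro hpr
        have : i.minFac = i := (Nat.prime_def_minFac.mp hpr).2
        rw [if_neg (by omega)]
    by_cases hb : spf.getD i 0 = i
    · rw [if_pos hb]
      have hpr : i.Prime := htest.mp hb
      apply spfLoop_getD N (i + 1) _ (by omega)
        (by rw [length_foldl_set_step _ _ _ (fun a b => by split_ifs <;> simp)]; exact hlen)
      intro m' h2' hN'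
      rw [markSpf_getD N (i - 1) i (i * i) spf m' (by omega)]
      have hs : i - 1 + 1 = i := by omega
      rw [hs]
      have hf := Nat.minFac_prime (show m' ≠ 1 by omega)
      have hfd := Nat.minFac_dvd m'
      have hfm : m'.minFac ≤ m' := Nat.le_of_dvd (by omega) hfd
      have hdconv : (i * i ≤ m' ∧ m' ≤ N ∧ i ∣ (m' - i * i)) ↔ (i * i ≤ m' ∧ i ∣ m') := by
        constructor
        · rintro ⟨h1, -, hd⟩
          have hadd := Nat.dvd_add hd (dvd_mul_right i i)
          have heq : m' - i * i + i * i = m' := by omega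
          rw [heq] at hadd
          exact ⟨h1, hadd⟩
        · rintro ⟨h1, hd⟩
          exact ⟨h1, hN', Nat.dvd_sub hd (dvd_mul_right i i)⟩
      by_cases hc : (i * i ≤ m' ∧ i ∣ m') ∧ spf.getD m' 0 = m'
      · rw [if_pos (by rw [and_congr hdconv Iff.rfl]; exact hc)]
        obtain ⟨⟨hsq, hdm⟩, hown⟩ := hc
        have hfle : m'.minFac ≤ i := Nat.minFac_le_of_dvd hpr.two_le hdm
        have hfge : i ≤ m'.minFac := by
          by_contra hlt
          have hcond : m'.minFac < i ∧ m'.minFac * m'.minFac ≤ m' := by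
            constructor
            · omega
            · nlinarith
          rw [hinv m' h2' hN', if_pos hcond] at hown
          omega
        have hfi : m'.minFac = i := by omega
        rw [if_pos ⟨by omega, by rw [hfi]; exact hsq⟩, hfi]
      · rw [if_neg (by rw [and_congr hdconv Iff.rfl]; exact hc)]
        rw [hinv m' h2' hN']
        have hne : ¬ (m'.minFac = i ∧ m'.minFac * m'.minFac ≤ m') := by
          rintro ⟨hfi, hsq⟩
          apply hc
          refine ⟨⟨by rw [← hfi]; exact hsq, by rw [← hfi]; exact hfd⟩, ?_⟩
          rw [hinv m' h2' hN', if_neg (by omega)]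
        by_cases hcond : m'.minFac < i ∧ m'.minFac * m'.minFac ≤ m'
        · rw [if_pos hcond, if_pos ⟨by omega, hcond.2⟩]
        · rw [if_neg hcond, if_neg (by
            rintro ⟨hlt, hsq⟩
            by_cases hfi : m'.minFac = i
            · exact hne ⟨hfi, hsq⟩
            · exact hcond ⟨by omega, hsq⟩)]
    · rw [if_neg hb]
      have hnp : ¬ i.Prime := fun hpr => hb (htest.mpr hpr)
      apply spfLoop_getD N (i + 1) spf (by omega) hlen
      intro m' h2' hN'
      rw [hinv m' h2' hN']
      have hf := Nat.minFac_prime (show m' ≠ 1 by omega)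
      have hne : m'.minFac ≠ i := fun he => hnp (he ▸ hf)
      by_cases hcond : m'.minFac < i ∧ m'.minFac * m'.minFac ≤ m'
      · rw [if_pos hcond, if_pos ⟨by omega, hcond.2⟩]
      · rw [if_neg hcond, if_neg (by
          rintro ⟨hlt, hsq⟩
          exact hcond ⟨by omega, hsq⟩)]
  · intro m h2 hN'
    rw [spfLoop]
    simp only [dif_neg h]
    rw [hinv m h2 hN']
    by_cases hsq : m.minFac * m.minFac ≤ m
    · rw [if_pos ⟨by nlinarith, hsq⟩, if_pos hsq]
    · rw [if_neg (by tauto), if_neg hsq]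
termination_by N + 1 - i
decreasing_by all_goals omega

-- after the sieve, every slot 2 ≤ m ≤ N holds m's smallest prime factor
theorem spf_final (N : Nat) (m : Nat) (h2 : 2 ≤ m) (hm : m ≤ N) :
    (spfLoop N (List.range (N + 1)) 2).getD m 0 = m.minFac := by
  have hinit : ∀ x, 2 ≤ x → x ≤ N →
      (List.range (N + 1)).getD x 0 = if x.minFac < 2 ∧ x.minFac * x.minFac ≤ x then x.minFac else x := by
    intro x h2x hxN
    have hf := Nat.minFac_prime (show x ≠ 1 by omega)
    rw [if_neg (by have := hf.two_le; omega)]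
    rw [List.getD_eq_getElem?_getD, List.getElem?_range (by omega : x < N + 1)]
    rfl
  rw [spfLoop_getD N 2 (List.range (N + 1)) (le_refl 2) (by simp) hinit m h2 hm]
  by_cases hsq : m.minFac * m.minFac ≤ m
  · rw [if_pos hsq]
  · rw [if_neg hsq]
    by_contra hne
    have hnp : ¬ m.Prime := by
      intro hpr
      exact hne ((Nat.prime_def_minFac.mp hpr).2.symm)
    obtain ⟨q, hq, hlt, hqd, hsq'⟩ := composite_small_factor m h2 hnp
    have hf1 : m.minFac ≤ q := Nat.minFac_le_of_dvd hq.two_le hqd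
    exact hsq (by nlinarith)

-- factorization loop: adds exactly the number of distinct prime factors
theorem factLoop_eq (N : Nat) (spf : List Nat)
    (hspf : ∀ x, 2 ≤ x → x ≤ N → spf.getD x 0 = x.minFac)
    (m count : Nat) (h1 : 1 ≤ m) (h2 : m ≤ N) :
    factLoop spf m count = count + m.primeFactors.card := by
  rw [factLoop]
  by_cases hm : 1 < m
  · rw [if_pos hm]
    have hp : spf.getD m 0 = m.minFac := hspf m (by omega) h2
    have hpr : m.minFac.Prime := Nat.minFac_prime (by omega)
    have hdvd : m.minFac ∣ m := Nat.minFac_dvd m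
    have hg : 2 ≤ spf.getD m 0 ∧ m % spf.getD m 0 = 0 :=
      ⟨by rw [hp]; exact hpr.two_le, by rw [hp]; exact Nat.mod_eq_zero_of_dvd hdvd⟩
    rw [dif_pos hg]
    obtain ⟨k, hk, hnds⟩ := stripFac_spec (spf.getD m 0) m hg.1 (by omega)
    set s := stripFac (spf.getD m 0) m with hsdef
    have hk' : m = m.minFac ^ k * s := by rw [← hp]; exact hk
    have hk1 : 1 ≤ k := by
      by_contra hk0
      have hz : k = 0 := by omega
      subst hz
      rw [pow_zero, one_mul] at hk'
      rw [hp] at hnds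
      exact hnds (by rw [← hk']; exact hdvd)
    have hs1 : 1 ≤ s := by
      rcases Nat.eq_zero_or_pos s with h0 | h0
      · rw [h0, mul_zero] at hk; omega
      · exact h0
    have hsN : s ≤ N := le_trans (le_trans (stripFac_le _ m) (le_refl m)) h2
    have hfac : m.primeFactors = insert m.minFac s.primeFactors := by
      conv_lhs => rw [hk']
      rw [Nat.primeFactors_mul (pow_ne_zero k (by have := hpr.two_le; omega)) (by omega),
        Nat.primeFactors_prime_pow (show k ≠ 0 by omega) hpr]
      ext q
      simp [Finset.mem_insert]
    have hdns : m.minFac ∉ s.primeFactors := by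
      intro hmem
      rw [hp] at hnds
      exact hnds (Nat.dvd_of_mem_primeFactors hmem)
    rw [factLoop_eq N spf hspf s (count + 1) hs1 hsN]
    rw [hfac, Finset.card_insert_of_notMem hdns]
    omega
  · rw [if_neg hm]
    have hm1 : m = 1 := by omega
    subst hm1
    simp
termination_by m
decreasing_by exact stripFac_lt _ m hg.1 (by omega) hg.2

theorem precompute_winner_spec_aux : ∀ (max_n : Int),
    precompute_winner max_n = precompute_winner_alt max_n := by
  intro max_n
  unfold precompute_winner precompute_winner_alt
  by_cases hlt : max_n < 2
  · rw [if_pos hlt, if_pos hlt]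
  · rw [if_neg hlt, if_neg hlt]
    set N := max_n.toNat with hN
    have hN2 : 2 ≤ N := by omega
    have hpos := sieve_mem_pos N
    apply List.ext_getElem?
    intro j
    rw [setfold_getElem?]
    simp only [List.length_replicate]
    by_cases hj0 : j = 0
    · subst hj0
      have hno : ¬ ((0 : Nat) ∈ List.range' 1 N ∧ 0 < N + 1) := by
        simp [List.mem_range'_1]
      rw [if_neg hno]
      simp
    · by_cases hjN : 1 ≤ j ∧ j ≤ N
      · have hmem : j ∈ List.range' 1 N ∧ j < N + 1 :=
          ⟨List.mem_range'_1.mpr ⟨hjN.1, by omega⟩, by omega⟩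
        rw [if_pos hmem]
        have hcons : (none :: (List.range' 1 N).map (fun n =>
            if factLoop (spfLoop N (List.range (N + 1)) 2) n 0 % 2 = 0 then some "Ben" else some "Maria"))[j]?
            = ((List.range' 1 N).map (fun n =>
            if factLoop (spfLoop N (List.range (N + 1)) 2) n 0 % 2 = 0 then some "Ben" else some "Maria"))[j-1]? := by
          cases j with
          | zero => omega
          | succ k => simp
        rw [hcons, List.getElem?_map, List.getElem?_range' (by omega : j - 1 < N)]
        simp only [Option.map_some]
        have hidx : 1 + 1 * (j - 1) = j := by omega
        rw [hidx]
        congr 1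
        have hmv := moves_getD N j hjN.1 hjN.2 (sieve_of_eratosthenes N)
          (List.replicate (N + 1) 0) (by simp) hpos
        rw [hmv]
        have hcnt : (sieve_of_eratosthenes N).countP (fun p => decide (j % p = 0))
            = j.primeFactors.card := by
          rw [sieve_primes N hN2, List.countP_filter, ← countP_primeFactors N j hjN.1 hjN.2]
        have homega : factLoop (spfLoop N (List.range (N + 1)) 2) j 0 = j.primeFactors.card := by
          rw [factLoop_eq N _ (fun x hx2 hxN => spf_final N x hx2 hxN) j 0 hjN.1 hjN.2]
          omega
        have hgetd : (List.replicate (N + 1) (0 : Int)).getD j 0 = 0 := by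
          rw [List.getD_eq_getElem?_getD, List.getElem?_replicate, if_pos (by omega : j < N + 1)]
          rfl
        rw [hgetd, hcnt, homega]
        apply if_congr _ rfl rfl
        omega
      · have h1 : ¬ (j ∈ List.range' 1 N ∧ j < N + 1) := by
          simp only [List.mem_range'_1]
          omega
        rw [if_neg h1]
        rw [List.getElem?_replicate]
        rw [if_neg (by omega)]
        symm
        apply List.getElem?_eq_none
        simp
        omega

-- ===== VERDICT (by name: the statement is the Claim_ definition above) =====
theorem precompute_winner_spec : Claim_equal_precompute_winner := by
  intro max_n _
  exact precompute_winner_spec_aux max_n
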